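-- pv_equiv track=rewrite | github.com/tasleson/lvm-dubstep | tools/doc_gen.py | container_type
-- ===== SOURCE A (Python) =====
-- TYPE_TABLE = {
--     'y': 'uint8_t',
--     'b': 'Boolean (0 is false, 1 is true)',
--     'n': "int16_t",
--     'q': "uint16_t",
--     'i': "int32_t",
--     'u': "uint32_t",
--     'x': "int64_t",
--     't': "uint64_t",
--     'd': "double",
--     'h': "Unix file descriptor",
--     's': 'String',
--     'o': 'Object path',
--     'g': 'Signature',
--     'v': 'Variant',
--     '': 'None'
-- }
--
-- def _get_array(data, i):
--
--     # An array of structures is a() an array with a simple type is just an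
--     # an array of that one type.  An array of mappings is a{}
--
--     if data[i] != 'a':
--         raise Exception("Something wrong here %s" % (data[i]))
--
--     if data[i + 1] == '(':
--         r, i = container_type(data, i + 1)
--         return "Array of " + r, i
--     elif data[i + 1] == '{':
--         r, i = _get_mapping(data, i + 1)
--         return "Dictionary:" + r, i
--     else:
--         return "Array of %s " % TYPE_TABLE[data[i + 1]], i + 2
--
-- def _get_mapping(data, i):
--     if data[i] != '{':
--         raise Exception("Something wrong here %s" % (data[i]))
--
--     r, i = container_type(data, i + 1)
--     return "{" + r + "}", i
--
-- def _get_structure(data, i):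
--     r, i = container_type(data, i + 1)
--     return "Structure (" + r + ")", i
--
-- def _append_data(d, msg):
--     if d:
--         d += ", "
--     return d + msg
--
-- def container_type(data, i):
--
--     result = ""
--
--     try:
--         while True:
--             c = data[i]
--
--             if c in '})':
--                 return result, i + 1
--             if c in TYPE_TABLE:
--                 result = _append_data(result, TYPE_TABLE[c])
--                 i += 1
--             elif c == 'a':
--                 r, i = _get_array(data, i)
--                 result = _append_data(result, r)
--             elif c == '{':
--                 r, i = _get_mapping(data, i)
--                 result = _append_data(result, r)
--             elif c == '(':
--                 r, i = _get_structure(data, i)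
--                 result = _append_data(result, r)
--             else:
--                 raise Exception("Unexpected type character %s" % (c))
--     except IndexError:
--         pass
--
--     return result, i
-- ===== SOURCE B (Python) =====
-- TYPE_TABLE = {
--     'y': 'uint8_t',
--     'b': 'Boolean (0 is false, 1 is true)',
--     'n': "int16_t",
--     'q': "uint16_t",
--     'i': "int32_t",
--     'u': "uint32_t",
--     'x': "int64_t",
--     't': "uint64_t",
--     'd': "double",
--     'h': "Unix file descriptor",
--     's': 'String',
--     'o': 'Object path',
--     'g': 'Signature',
--     'v': 'Variant',
--     '': 'None'
-- }
--
-- def _append(d, msg):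
--     return (d + ", " if d else d) + msg
--
-- def _wrap(kind, body):
--     if kind == 'struct':
--         return "Structure (" + body + ")"
--     if kind == 'map':
--         return "{" + body + "}"
--     if kind == 'array':
--         return "Array of " + body
--     return "Dictionary:{" + body + "}"
--
-- def container_type(data, i):
--     # One iterative scan with an explicit stack of (parent_acc, kind) frames;
--     # an IndexError at the end of the signature closes every open frame.
--     acc = ""
--     stack = []
--     try:
--         while True:
--             c = data[i]
--             if c in ')}':
--                 if not stack:
--                     return acc, i + 1
--                 parent, kind = stack.pop()
--                 acc = _append(parent, _wrap(kind, acc))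
--                 i += 1
--             elif c == '(':
--                 stack.append((acc, 'struct'))
--                 acc = ""
--                 i += 1
--             elif c == '{':
--                 stack.append((acc, 'map'))
--                 acc = ""
--                 i += 1
--             elif c == 'a':
--                 nxt = data[i + 1]
--                 if nxt == '(':
--                     stack.append((acc, 'array'))
--                     acc = ""
--                     i += 1
--                 elif nxt == '{':
--                     stack.append((acc, 'dict'))
--                     acc = ""
--                     i += 2
--                 else:
--                     acc = _append(acc, "Array of %s " % TYPE_TABLE[nxt])
--                     i += 2
--             else:
--                 acc = _append(acc, TYPE_TABLE[c])
--                 i += 1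
--     except IndexError:
--         while stack:
--             parent, kind = stack.pop()
--             acc = _append(parent, _wrap(kind, acc))
--     return acc, i
-- ===== Notes on version B (the rewrite author's own statement) =====
-- stated objective: alternative
-- what changed: A's mutually recursive descent (container_type/_get_array/_get_mapping/_get_structure, one try per recursion level) is replaced by a single iterative scan with an explicit stack of (parent-accumulator, kind) frames and one try, closing all open frames when the signature ends; Pre_ excludes inputs on which A raises (invalid type character, or 'a' followed by 'a'/')'/'}'), checked conservatively over the whole reachable scan region, so it also excludes a few inputs on which A returns early via a top-level ')'/'}' before the offending character.
-- outside the precondition, e.g. on container_type(')?', 0): A returns ('', 1), B returns ('', 1); on container_type(')aa', 0): A returns ('', 1), B returns ('', 1)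
import Mathlib
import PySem

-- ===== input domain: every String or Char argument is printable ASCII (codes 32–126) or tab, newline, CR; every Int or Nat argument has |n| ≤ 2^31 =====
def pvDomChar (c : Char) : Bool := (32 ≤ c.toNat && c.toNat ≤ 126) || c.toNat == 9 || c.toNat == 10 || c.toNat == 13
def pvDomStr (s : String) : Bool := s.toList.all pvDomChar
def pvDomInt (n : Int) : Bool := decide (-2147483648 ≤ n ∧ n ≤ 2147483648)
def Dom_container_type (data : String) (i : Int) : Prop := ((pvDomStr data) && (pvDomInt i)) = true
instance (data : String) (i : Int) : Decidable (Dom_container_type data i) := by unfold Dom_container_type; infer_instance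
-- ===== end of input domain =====

-- B replaces A's mutual recursion by a single iterative scan over an explicit stack of frames; same return value, no speed claim.


-- ===== PORT A =====

-- TYPE_TABLE (the '' : 'None' entry can never match a single character, so it is omitted)
def pvTypeTable : PySem.Dict Char String := PySem.Dict.ofList
  [('y', "uint8_t"), ('b', "Boolean (0 is false, 1 is true)"), ('n', "int16_t"),
   ('q', "uint16_t"), ('i', "int32_t"), ('u', "uint32_t"), ('x', "int64_t"),
   ('t', "uint64_t"), ('d', "double"), ('h', "Unix file descriptor"),
   ('s', "String"), ('o', "Object path"), ('g', "Signature"), ('v', "Variant")]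

-- _append_data (A) / _append (B)
def pvApp (d msg : String) : String := (if d ≠ "" then d ++ ", " else d) ++ msg

-- weaken the leftover-fuel bound
def pvLift {f g : Nat} (h : f ≤ g) :
    Option (String × Int × {k : Nat // k < f}) → Option (String × Int × {k : Nat // k < g}) :=
  Option.map (fun p => (p.1, p.2.1, ⟨p.2.2.1, Nat.lt_of_lt_of_le p.2.2.2 h⟩))

-- A's container_type with _get_array/_get_mapping/_get_structure inlined at their call
-- sites.  Fuel: one unit per loop iteration (= per data[i] read, exactly as in Python);
-- the leftover fuel is returned so the caller's loop continues with it.  none = an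
-- exception Python does NOT catch (the explicit raise / KeyError) or fuel exhaustion;
-- the IndexError branches (pyGet? = none) are the ones Python catches: they return.
def pvCtA (data : List Char) : (f : Nat) → String → Int → Option (String × Int × {k : Nat // k < f})
  | 0, _, _ => none
  | g+1, result, i =>
    match PySem.List.pyGet? data i with
    | none => some (result, i, ⟨g, Nat.lt_succ_self g⟩)            -- IndexError caught: return result, i
    | some c =>
      if c = ')' ∨ c = '}' then some (result, i+1, ⟨g, Nat.lt_succ_self g⟩)
      else
        match PySem.Dict.get? pvTypeTable c with
        | some t => pvLift (Nat.le_succ g) (pvCtA data g (pvApp result t) (i+1))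
        | none =>
          if c = 'a' then
            -- _get_array(data, i)
            match PySem.List.pyGet? data (i+1) with
            | none => some (result, i, ⟨g, Nat.lt_succ_self g⟩)    -- IndexError caught by this level
            | some d =>
              if d = '(' then
                match pvCtA data g "" (i+1) with
                | none => none
                | some (r, i', f') =>
                  pvLift (Nat.le_of_lt (Nat.lt_succ_of_lt f'.2)) (pvCtA data f'.1 (pvApp result ("Array of " ++ r)) i')
              else if d = '{' then
                -- _get_mapping(data, i+1)
                match pvCtA data g "" (i+2) with
                | none => none
                | some (r, i', f') =>
                  pvLift (Nat.le_of_lt (Nat.lt_succ_of_lt f'.2)) (pvCtA data f'.1 (pvApp result ("Dictionary:" ++ ("{" ++ r ++ "}"))) i')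
              else
                match PySem.Dict.get? pvTypeTable d with
                | some t => pvLift (Nat.le_succ g) (pvCtA data g (pvApp result ("Array of " ++ t ++ " ")) (i+2))
                | none => none                                     -- KeyError: not caught
          else if c = '{' then
            -- _get_mapping(data, i)
            match pvCtA data g "" (i+1) with
            | none => none
            | some (r, i', f') =>
              pvLift (Nat.le_of_lt (Nat.lt_succ_of_lt f'.2)) (pvCtA data f'.1 (pvApp result ("{" ++ r ++ "}")) i')
          else if c = '(' then
            -- _get_structure(data, i)
            match pvCtA data g "" (i+1) with
            | none => none
            | some (r, i', f') =>
              pvLift (Nat.le_of_lt (Nat.lt_succ_of_lt f'.2)) (pvCtA data f'.1 (pvApp result ("Structure (" ++ r ++ ")")) i')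
          else none                                                -- raise Exception: not caught
  termination_by f => f
  decreasing_by
    all_goals first
      | exact Nat.lt_succ_self g
      | exact Nat.lt_succ_of_lt f'.2

-- fuel amply covering every loop iteration A performs (i strictly increases except
-- during the final unwind, which does at most one extra read per open frame)
def pvFuel (n : Nat) : Nat := 4 * n + 8

def container_type (data : String) (i : Int) : String × Int :=
  match pvCtA data.toList (pvFuel data.toList.length) "" i with
  | some (r, i', _) => (r, i')
  | none => ("", i)      -- uncaught exception / fuel out: unreachable inside Pre_

-- ===== PORT B =====

-- Source B's frame tags 'struct' / 'map' / 'array' / 'dict'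
inductive PvKind | struct | map | array | dict
deriving DecidableEq, Repr

-- Source B's _wrap(kind, body)
def pvWrap (k : PvKind) (r : String) : String :=
  match k with
  | .struct => "Structure (" ++ r ++ ")"
  | .map => "{" ++ r ++ "}"
  | .array => "Array of " ++ r
  | .dict => "Dictionary:{" ++ r ++ "}"

-- Source B's except-branch: 'while stack: pop and wrap' (one fuel unit per pop)
def pvUnwB (data : List Char) : Nat → Int → String → List (String × PvKind) → Option (String × Int)
  | _, i, acc, [] => some (acc, i)
  | 0, _, _, _ :: _ => none
  | g+1, i, acc, (p, k) :: s => pvUnwB data g i (pvApp p (pvWrap k acc)) s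

-- Source B's main loop: stack of (parent_acc, kind); pyGet? = none is the IndexError the
-- try catches, which jumps to the unwind loop.  none = uncaught KeyError / fuel out.
def pvLoopB (data : List Char) : Nat → Int → String → List (String × PvKind) → Option (String × Int)
  | 0, _, _, _ => none
  | g+1, i, acc, stack =>
    match PySem.List.pyGet? data i with
    | none => pvUnwB data g i acc stack
    | some c =>
      if c = ')' ∨ c = '}' then
        match stack with
        | [] => some (acc, i+1)
        | (p, k) :: s => pvLoopB data g (i+1) (pvApp p (pvWrap k acc)) s
      else if c = '(' then pvLoopB data g (i+1) "" ((acc, .struct) :: stack)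
      else if c = '{' then pvLoopB data g (i+1) "" ((acc, .map) :: stack)
      else if c = 'a' then
        match PySem.List.pyGet? data (i+1) with
        | none => pvUnwB data g i acc stack                -- IndexError on data[i+1]
        | some d =>
          if d = '(' then pvLoopB data g (i+1) "" ((acc, .array) :: stack)
          else if d = '{' then pvLoopB data g (i+2) "" ((acc, .dict) :: stack)
          else
            match PySem.Dict.get? pvTypeTable d with
            | some t => pvLoopB data g (i+2) (pvApp acc ("Array of " ++ t ++ " ")) stack
            | none => none                                 -- KeyError
      else
        match PySem.Dict.get? pvTypeTable c with
        | some t => pvLoopB data g (i+1) (pvApp acc t) stack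
        | none => none                                     -- KeyError

def container_type_alt (data : String) (i : Int) : String × Int :=
  match pvLoopB data.toList (pvFuel data.toList.length) i "" [] with
  | some out => out
  | none => ("", i)      -- KeyError / fuel out: unreachable inside Pre_

-- ===== PRECONDITION & SPEC =====

-- characters a signature may contain
def pvSigChar (c : Char) : Bool := c ∈ "ybnqiuxtdhsogva(){}".toList

-- the characters A can possibly read, in reading order: from position i to the end,
-- preceded (for an in-range negative i, which Python wraps) by nothing — a negative i
-- starts at position n+i and, crossing -1 → 0, rescans the whole string
def pvScanSeq (l : List Char) (i : Int) : List Char :=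
  if 0 ≤ i then l.drop i.toNat else l.drop (l.length + i).toNat ++ l

-- adjacent pairs of the scan sequence: no 'a' followed by 'a', ')' or '}' (KeyError in A)
def pvOkPairs : List Char → Bool
  | a :: b :: rest => (!(a = 'a' && (b = 'a' || b = ')' || b = '}'))) && pvOkPairs (b :: rest)
  | _ => true

-- Pre_ excludes the inputs on which Python A raises: a character outside the signature
-- alphabet, or an 'a' whose next read character is 'a', ')' or '}' (KeyError).  It checks
-- the whole reachable scan region, so it conservatively also excludes some inputs on
-- which A returns early (a top-level ')'/'}' before the offending character) — see cites.
def Pre_container_type (data : String) (i : Int) : Prop :=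
  ((decide ((data.toList.length : Int) ≤ i) || decide (i < -(data.toList.length : Int))) ||
   ((pvScanSeq data.toList i).all pvSigChar && pvOkPairs (pvScanSeq data.toList i))) = true

instance (data : String) (i : Int) : Decidable (Pre_container_type data i) := by
  unfold Pre_container_type; infer_instance

def pvWitness_container_type : String × Int := ("a{sv}", 0)

def Spec_container_type (data : String) (i : Int) (out : String × Int) : Prop := out = container_type_alt data i
instance (data : String) (i : Int) (out : String × Int) : Decidable (Spec_container_type data i out) := by unfold Spec_container_type; infer_instance

-- ===== CLAIM (what is proved, stated in full; the proofs are below) =====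
def Claim_equal_container_type : Prop := ∀ (data : String) (i : Int), Dom_container_type data i → Pre_container_type data i → Spec_container_type data i (container_type data i)

-- ===== LEMMAS AND PROOFS =====

-- A-side continuation of a stack of pending container_type frames: after the current
-- level returns (r, i') with leftover fuel f, each parent appends the wrapped result
-- and resumes its loop.
def pvUnw (data : List Char) : List (String × PvKind) → String → Int → Nat → Option (String × Int)
  | [], r, i, _ => some (r, i)
  | (p, k) :: s, r, i, f =>
    match pvCtA data f (pvApp p (pvWrap k r)) i with
    | none => none
    | some (r', i', f') => pvUnw data s r' i' f'.1

lemma pvDict_wrap (r : String) :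
    "Dictionary:" ++ ("{" ++ r ++ "}") = "Dictionary:{" ++ r ++ "}" := by
  rw [← String.append_assoc, ← String.append_assoc]
  rfl

-- at a position where every resumed parent immediately hits the same IndexError,
-- A's unwinding equals B's unwind loop (both spend one fuel unit per frame)
lemma pv_unw_end (data : List Char) (i : Int)
    (h : PySem.List.pyGet? data i = none ∨
         (PySem.List.pyGet? data i = some 'a' ∧ PySem.List.pyGet? data (i+1) = none)) :
    ∀ stack r f, pvUnw data stack r i f = pvUnwB data f i r stack := by
  intro stack
  induction stack with
  | nil => intro r f; simp [pvUnw, pvUnwB]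
  | cons pk s ih =>
    rcases pk with ⟨p, k⟩
    intro r f
    match f with
    | 0 =>
      rcases h with h | ⟨h1, h2⟩ <;> simp [pvUnw, pvCtA, pvUnwB]
    | g+1 =>
      have hstep : pvCtA data (g+1) (pvApp p (pvWrap k r)) i =
          some (pvApp p (pvWrap k r), i, ⟨g, Nat.lt_succ_self g⟩) := by
        rcases h with h | ⟨h1, h2⟩
        · rw [pvCtA.eq_def]; simp [h]
        · rw [pvCtA.eq_def]
          simp only [h1, h2]
          have : PySem.Dict.get? pvTypeTable 'a' = none := by decide
          simp [this]
      simp only [pvUnw, hstep, pvUnwB]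
      exact ih (pvApp p (pvWrap k r)) g

lemma pv_main (data : List Char) : ∀ f i acc stack,
    pvLoopB data f i acc stack =
      match pvCtA data f acc i with
      | none => none
      | some (r, i', f') => pvUnw data stack r i' f'.1 := by
  intro f
  induction f using Nat.strong_induction_on with
  | _ f ih =>
    intro i acc stack
    match f with
    | 0 => simp [pvLoopB, pvCtA]
    | g + 1 =>
      rw [pvLoopB.eq_def, pvCtA.eq_def]
      rcases hgi : PySem.List.pyGet? data i with _ | c
      · simp only [hgi]
        exact (pv_unw_end data i (Or.inl hgi) stack acc g).symm
      · simp only [hgi]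
        by_cases hcl : c = ')' ∨ c = '}'
        · simp only [if_pos hcl]
          rcases stack with _ | ⟨⟨p, k⟩, s⟩
          · simp [pvUnw]
          · simp only [pvUnw]
            exact ih g (Nat.lt_succ_self g) (i+1) (pvApp p (pvWrap k acc)) s
        · simp only [if_neg hcl]
          rcases htab : PySem.Dict.get? pvTypeTable c with _ | t
          · -- c is not a simple type
            by_cases hca : c = 'a'
            · subst hca
              have hna : ¬ (('a' : Char) = ')' ∨ ('a' : Char) = '}') := by simp
              have hnp : ('a' : Char) ≠ '(' := by decide
              have hnm : ('a' : Char) ≠ '{' := by decide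
              simp only [if_neg hnm, reduceIte]
              rcases hni : PySem.List.pyGet? data (i+1) with _ | d
              · exact (pv_unw_end data i (Or.inr ⟨hgi, hni⟩) stack acc g).symm
              · 
                by_cases hd1 : d = '('
                · subst hd1
                  simp only [reduceIte]
                  rw [ih g (Nat.lt_succ_self g) (i+1) "" ((acc, .array) :: stack)]
                  rcases pvCtA data g "" (i+1) with _ | ⟨r, i2, f2⟩
                  · simp
                  · simp only [pvUnw, pvWrap]
                    rcases pvCtA data f2.1 (pvApp acc ("Array of " ++ r)) i2 with _ | ⟨r3, i3, f3⟩ <;>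
                      simp [pvLift]
                · simp only [if_neg hd1]
                  by_cases hd2 : d = '{'
                  · subst hd2
                    simp only [reduceIte]
                    rw [ih g (Nat.lt_succ_self g) (i+2) "" ((acc, .dict) :: stack)]
                    rcases pvCtA data g "" (i+2) with _ | ⟨r, i2, f2⟩
                    · simp
                    · simp only [pvUnw, pvWrap, pvDict_wrap]
                      rcases pvCtA data f2.1 (pvApp acc ("Dictionary:{" ++ r ++ "}")) i2 with _ | ⟨r3, i3, f3⟩ <;>
                        simp [pvLift]
                  · simp only [if_neg hd2]
                    rcases htd : PySem.Dict.get? pvTypeTable d with _ | t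
                    · simp
                    · simp only []
                      rw [ih g (Nat.lt_succ_self g) (i+2)
                            (pvApp acc ("Array of " ++ t ++ " ")) stack]
                      rcases pvCtA data g (pvApp acc ("Array of " ++ t ++ " ")) (i+2) with _ | ⟨r, i2, f2⟩ <;>
                        simp [pvLift]
            · -- c is not 'a'
              simp only [if_neg hca]
              by_cases hcs : c = '('
              · subst hcs
                simp only [reduceIte]
                rw [ih g (Nat.lt_succ_self g) (i+1) "" ((acc, .struct) :: stack)]
                rcases pvCtA data g "" (i+1) with _ | ⟨r, i2, f2⟩
                · simp
                · simp only [pvUnw, pvWrap]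
                  rcases pvCtA data f2.1 (pvApp acc ("Structure (" ++ r ++ ")")) i2 with _ | ⟨r3, i3, f3⟩ <;>
                    simp [pvLift]
              · simp only [if_neg hcs]
                by_cases hcm : c = '{'
                · subst hcm
                  simp only [reduceIte]
                  rw [ih g (Nat.lt_succ_self g) (i+1) "" ((acc, .map) :: stack)]
                  rcases pvCtA data g "" (i+1) with _ | ⟨r, i2, f2⟩
                  · simp
                  · simp only [pvUnw, pvWrap]
                    rcases pvCtA data f2.1 (pvApp acc ("{" ++ r ++ "}")) i2 with _ | ⟨r3, i3, f3⟩ <;>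
                      simp [pvLift]
                · simp only [if_neg hcm]
          · -- simple type character
            have hc : c ≠ 'a' ∧ c ≠ '(' ∧ c ≠ '{' := by
              refine ⟨?_, ?_, ?_⟩ <;> rintro rfl <;>
                simp only [show pvTypeTable.get? 'a' = none from by decide,
                           show pvTypeTable.get? '(' = none from by decide,
                           show pvTypeTable.get? '{' = none from by decide,
                           reduceCtorEq] at htab
            simp only [if_neg hc.1, if_neg hc.2.1, if_neg hc.2.2]
            rw [ih g (Nat.lt_succ_self g) (i+1) (pvApp acc t) stack]
            rcases pvCtA data g (pvApp acc t) (i+1) with _ | ⟨r, i2, f2⟩ <;> simp [pvLift]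

lemma pv_ports_eq (data : String) (i : Int) :
    container_type data i = container_type_alt data i := by
  unfold container_type container_type_alt
  rw [pv_main]
  rcases h : pvCtA data.toList (pvFuel data.toList.length) "" i with _ | ⟨r, i', f'⟩ <;> simp [pvUnw]

-- ===== VERDICT (by name: the statement is the Claim_ definition above) =====
theorem container_type_spec : Claim_equal_container_type := by
  intro data i _ _
  unfold Spec_container_type
  exact pv_ports_eq data i
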